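-- pv_equiv track=rewrite | github.com/its-dhanya/AIH-2025-Finals | backend/api.py | pick_candidate_models
-- ===== SOURCE A (Python) =====
-- from typing import List, Optional, Dict, Any, Tuple
--
-- PREFERRED_GEMINI_MODELS = [
--     "gemini-1.5-flash",
--     "gemini-1.5-pro",
--     "gemini-1.5-flash-8b-001",
--     "gemini-2.0-flash",
--     "gemini-2.5-flash"
-- ]
--
-- def pick_candidate_models(available: List[str]) -> List[str]:
--     chosen = []
--     for p in PREFERRED_GEMINI_MODELS:
--         for a in available:
--             if p in a or a in p or a == p:
--                 if a not in chosen: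
--                     chosen.append(a)
--     for a in available:
--         if a not in chosen:
--             chosen.append(a)
--         if len(chosen) >= 6:
--             break
--     return chosen
-- ===== SOURCE B (Python) =====
-- PREFERRED_GEMINI_MODELS = [
--     "gemini-1.5-flash",
--     "gemini-1.5-pro",
--     "gemini-1.5-flash-8b-001",
--     "gemini-2.0-flash",
--     "gemini-2.5-flash",
-- ]
--
-- def pick_candidate_models(available):
--     n = len(PREFERRED_GEMINI_MODELS)
--
--     def rank(a):
--         return next((i for i, p in enumerate(PREFERRED_GEMINI_MODELS)
--                      if p in a or a in p), n)
--
--     uniq = list(dict.fromkeys(available))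
--     result = sorted((a for a in uniq if rank(a) < n), key=rank)
--     for a in uniq:
--         if rank(a) == n:
--             result.append(a)
--         if len(result) >= 6:
--             break
--     return result
-- ===== Notes on version B (the rewrite author's own statement) =====
-- stated objective: alternative
-- what changed: Replaces the nested preferred-by-available loops with membership dedup by a single pass: dedup available once, compute each model's first-matching-preference rank once, stable-sort the matched models by rank, then append unmatched ones with the same cap-at-6 break.
import Mathlib
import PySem

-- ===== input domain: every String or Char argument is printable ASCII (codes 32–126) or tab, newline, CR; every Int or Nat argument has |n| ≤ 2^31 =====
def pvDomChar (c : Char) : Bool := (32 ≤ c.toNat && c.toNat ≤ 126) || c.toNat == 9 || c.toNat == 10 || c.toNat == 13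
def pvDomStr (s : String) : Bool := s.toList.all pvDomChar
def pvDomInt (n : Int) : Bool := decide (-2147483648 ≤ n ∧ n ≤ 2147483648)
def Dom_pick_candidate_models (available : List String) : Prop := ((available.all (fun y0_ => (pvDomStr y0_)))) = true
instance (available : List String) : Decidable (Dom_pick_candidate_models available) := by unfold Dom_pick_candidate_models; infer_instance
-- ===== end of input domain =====

-- B replaces A's nested preference×available loops (with membership dedup) by: dedup once,
-- rank each model by its first matching preference, stable-sort matched by rank, then append
-- unmatched with the same cap-at-6 break ("alternative": different algorithm, similar cost).

def PREFERRED_GEMINI_MODELS : List String :=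
  ["gemini-1.5-flash", "gemini-1.5-pro", "gemini-1.5-flash-8b-001",
   "gemini-2.0-flash", "gemini-2.5-flash"]

-- ===== PORT A =====
-- `p in a or a in p or a == p`
def pvMatchA (p a : String) : Bool := PySem.Str.isIn p a || PySem.Str.isIn a p || (a == p)

-- A's second loop: `for a in available: if a not in chosen: append; if len(chosen) >= 6: break`
def pvPhase2A (chosen : List String) : List String → List String
  | [] => chosen
  | a :: t =>
    let chosen' := if a ∈ chosen then chosen else chosen ++ [a]
    if 6 ≤ chosen'.length then chosen' else pvPhase2A chosen' t

def pick_candidate_models (available : List String) : List String :=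
  let chosen := PREFERRED_GEMINI_MODELS.foldl
    (fun chosen p => available.foldl
      (fun chosen a =>
        if pvMatchA p a then (if a ∈ chosen then chosen else chosen ++ [a]) else chosen)
      chosen) []
  pvPhase2A chosen available

-- ===== PORT B =====
-- `p in a or a in p`
def pvMatchB (p a : String) : Bool := PySem.Str.isIn p a || PySem.Str.isIn a p

-- `next((i for i, p in enumerate(PREFERRED_GEMINI_MODELS) if p in a or a in p), n)`
def pvRankGo (a : String) (i : Nat) : List String → Nat
  | [] => i
  | p :: ps => if pvMatchB p a then i else pvRankGo a (i + 1) ps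

def pvRank (a : String) : Nat := pvRankGo a 0 PREFERRED_GEMINI_MODELS

-- B's second loop: `for a in uniq: if rank(a) == n: result.append(a); if len(result) >= 6: break`
def pvPhase2B (n : Nat) (result : List String) : List String → List String
  | [] => result
  | a :: u =>
    let result' := if pvRank a == n then result ++ [a] else result
    if 6 ≤ result'.length then result' else pvPhase2B n result' u

def pick_candidate_models_alt (available : List String) : List String :=
  let n := PREFERRED_GEMINI_MODELS.length
  let uniq := PySem.List.dedup available
  let result := PySem.List.sorted (uniq.filter (fun a => pvRank a < n)) (fun a => pvRank a) false
  pvPhase2B n result uniq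

-- ===== PRECONDITION & SPEC =====
def Spec_pick_candidate_models (available : List String) (out : List String) : Prop := out = pick_candidate_models_alt available
instance (available : List String) (out : List String) : Decidable (Spec_pick_candidate_models available out) := by unfold Spec_pick_candidate_models; infer_instance

-- ===== CLAIM (what is proved, stated in full; the proofs are below) =====
def Claim_equal_pick_candidate_models : Prop := ∀ (available : List String), Dom_pick_candidate_models available → Spec_pick_candidate_models available (pick_candidate_models available)

-- ===== LEMMAS AND PROOFS =====

theorem pvMatchA_eq (p a : String) : pvMatchA p a = pvMatchB p a := by
  unfold pvMatchA pvMatchB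
  by_cases h : a = p
  · subst h
    have h2 : PySem.Chars.isIn a.toList a.toList = true :=
      (PySem.Chars.isIn_iff_infix a.toList a.toList).mpr List.infix_rfl
    simp [h2]
  · simp [h]

theorem pvRank_eq (a : String) :
    pvRank a =
      if pvMatchB "gemini-1.5-flash" a then 0
      else if pvMatchB "gemini-1.5-pro" a then 1
      else if pvMatchB "gemini-1.5-flash-8b-001" a then 2
      else if pvMatchB "gemini-2.0-flash" a then 3
      else if pvMatchB "gemini-2.5-flash" a then 4
      else 5 := by
  simp [pvRank, PREFERRED_GEMINI_MODELS, pvRankGo]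

theorem pvRank_le (a : String) : pvRank a ≤ 5 := by
  rw [pvRank_eq]; split_ifs <;> omega

def pvCollect (k : Nat) (D : List String) : List String → List String
  | [] => []
  | a :: t => if pvRank a = k ∧ a ∉ D then a :: pvCollect k (D ++ [a]) t else pvCollect k D t

theorem pvInner_fold (p : String) (k : Nat)
    (hm1 : ∀ a, pvRank a = k → pvMatchA p a = true)
    (hm2 : ∀ a, pvMatchA p a = true → pvRank a ≤ k) :
    ∀ (t C D : List String),
    (∀ a ∈ C, pvRank a < k) → (∀ a ∈ t, pvRank a < k → a ∈ C) → (∀ a ∈ D, pvRank a = k) →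
    t.foldl (fun ch a =>
        if pvMatchA p a then (if a ∈ ch then ch else ch ++ [a]) else ch) (C ++ D)
      = (C ++ D) ++ pvCollect k D t := by
  intro t
  induction t with
  | nil => intro C D _ _ _; simp [pvCollect]
  | cons a t ih =>
    intro C D hC hC2 hD
    simp only [List.foldl_cons, pvCollect]
    by_cases hr : pvRank a = k
    · have hmatch : pvMatchA p a = true := hm1 a hr
      have haC : a ∉ C := fun h => absurd (hC a h) (by omega)
      by_cases hDm : a ∈ D
      · have : a ∈ C ++ D := List.mem_append.mpr (Or.inr hDm)
        rw [if_pos hmatch, if_pos this, if_neg (by simp [hr, hDm])]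
        exact ih C D hC (fun b hb => hC2 b (List.mem_cons_of_mem a hb)) hD
      · have hnm : a ∉ C ++ D := by simp [haC, hDm]
        rw [if_pos hmatch, if_neg hnm, if_pos ⟨hr, hDm⟩]
        have := ih C (D ++ [a]) hC (fun b hb => hC2 b (List.mem_cons_of_mem a hb))
          (by intro b hb; rcases List.mem_append.mp hb with h | h
              · exact hD b h
              · simp at h; subst h; exact hr)
        rw [show C ++ D ++ [a] = C ++ (D ++ [a]) by simp, this]; simp
    · have hcoll : ¬ (pvRank a = k ∧ a ∉ D) := fun h => hr h.1
      rw [if_neg hcoll]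
      by_cases hmatch : pvMatchA p a = true
      · have hlt : pvRank a < k := lt_of_le_of_ne (hm2 a hmatch) hr
        have : a ∈ C ++ D := List.mem_append.mpr (Or.inl (hC2 a (List.mem_cons_self) hlt))
        rw [if_pos hmatch, if_pos this]
        exact ih C D hC (fun b hb => hC2 b (List.mem_cons_of_mem a hb)) hD
      · rw [if_neg hmatch]
        exact ih C D hC (fun b hb => hC2 b (List.mem_cons_of_mem a hb)) hD

theorem pvCollect_eq_filter (k : Nat) :
    ∀ (t D : List String),
    pvCollect k D t = (PySem.Set.ofList t).filter (fun a => pvRank a == k && !(D.contains a)) := by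
  intro t
  induction t with
  | nil => intro D; simp [pvCollect, PySem.Set.ofList]
  | cons a t ih =>
    intro D
    rw [PySem.Set.ofList_cons]
    simp only [pvCollect, List.filter_cons]
    by_cases hcond : pvRank a = k ∧ a ∉ D
    · rw [if_pos hcond]
      have hb : (pvRank a == k && !(D.contains a)) = true := by
        simp [hcond.1]
        simpa using hcond.2
      rw [hb, ih (D ++ [a])]
      congr 1
      unfold PySem.Set.discard
      rw [List.filter_filter]
      apply List.filter_congr
      intro x hx
      by_cases hxa : x = a
      · subst hxa
        simp
      · simp [List.contains_eq_mem, hxa]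
    · rw [if_neg hcond]
      have hb : (pvRank a == k && !(D.contains a)) = false := by
        rcases not_and_or.mp hcond with h | h
        · simp [h]
        · simp at h
          simp [h]
      rw [hb, ih D]
      unfold PySem.Set.discard
      rw [List.filter_filter]
      apply List.filter_congr
      intro x hx
      by_cases hxa : x = a
      · subst hxa; simp; intro h; by_contra hmem; exact hcond ⟨h, hmem⟩
      · simp [hxa]

def pvBucket (available : List String) (i : Nat) : List String :=
  (PySem.Set.ofList available).filter (fun a => pvRank a == i)

theorem pvMem_bucket {available : List String} {a : String} (h : a ∈ available) :
    a ∈ pvBucket available (pvRank a) := by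
  simp [pvBucket, List.mem_filter, PySem.Set.mem_ofList, h]

theorem pvBucket_rank {available : List String} {a : String} {i : Nat}
    (h : a ∈ pvBucket available i) : pvRank a = i ∧ a ∈ available := by
  simp [pvBucket, List.mem_filter, PySem.Set.mem_ofList] at h
  exact ⟨h.2, h.1⟩

theorem pvInner_fold' (p : String) (k : Nat)
    (hm1 : ∀ a, pvRank a = k → pvMatchA p a = true)
    (hm2 : ∀ a, pvMatchA p a = true → pvRank a ≤ k)
    (available C : List String)
    (hC : ∀ a ∈ C, pvRank a < k) (hC2 : ∀ a ∈ available, pvRank a < k → a ∈ C) :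
    available.foldl (fun ch a =>
        if pvMatchA p a then (if a ∈ ch then ch else ch ++ [a]) else ch) C
      = C ++ pvBucket available k := by
  have h := pvInner_fold p k hm1 hm2 available C [] hC hC2 (by simp)
  simp only [List.append_nil] at h
  rw [h, pvCollect_eq_filter]
  simp [pvBucket]

set_option maxHeartbeats 1000000 in
theorem pvM1_0 : ∀ a, pvRank a = 0 → pvMatchA "gemini-1.5-flash" a = true := by
  intro a h; rw [pvMatchA_eq]; rw [pvRank_eq] at h
  split_ifs at h with h0 h1 h2 h3 h4 <;> first | omega | exact h0

set_option maxHeartbeats 1000000 in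
theorem pvM2_0 : ∀ a, pvMatchA "gemini-1.5-flash" a = true → pvRank a ≤ 0 := by
  intro a h; rw [pvMatchA_eq] at h; rw [pvRank_eq]
  split_ifs with h0 h1 h2 h3 h4 <;> first | omega | exact absurd h h0

set_option maxHeartbeats 1000000 in
theorem pvM1_1 : ∀ a, pvRank a = 1 → pvMatchA "gemini-1.5-pro" a = true := by
  intro a h; rw [pvMatchA_eq]; rw [pvRank_eq] at h
  split_ifs at h with h0 h1 h2 h3 h4 <;> first | omega | exact h1

set_option maxHeartbeats 1000000 in
theorem pvM2_1 : ∀ a, pvMatchA "gemini-1.5-pro" a = true → pvRank a ≤ 1 := by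
  intro a h; rw [pvMatchA_eq] at h; rw [pvRank_eq]
  split_ifs with h0 h1 h2 h3 h4 <;> first | omega | exact absurd h h1

set_option maxHeartbeats 1000000 in
theorem pvM1_2 : ∀ a, pvRank a = 2 → pvMatchA "gemini-1.5-flash-8b-001" a = true := by
  intro a h; rw [pvMatchA_eq]; rw [pvRank_eq] at h
  split_ifs at h with h0 h1 h2 h3 h4 <;> first | omega | exact h2

set_option maxHeartbeats 1000000 in
theorem pvM2_2 : ∀ a, pvMatchA "gemini-1.5-flash-8b-001" a = true → pvRank a ≤ 2 := by
  intro a h; rw [pvMatchA_eq] at h; rw [pvRank_eq]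
  split_ifs with h0 h1 h2 h3 h4 <;> first | omega | exact absurd h h2

set_option maxHeartbeats 1000000 in
theorem pvM1_3 : ∀ a, pvRank a = 3 → pvMatchA "gemini-2.0-flash" a = true := by
  intro a h; rw [pvMatchA_eq]; rw [pvRank_eq] at h
  split_ifs at h with h0 h1 h2 h3 h4 <;> first | omega | exact h3

set_option maxHeartbeats 1000000 in
theorem pvM2_3 : ∀ a, pvMatchA "gemini-2.0-flash" a = true → pvRank a ≤ 3 := by
  intro a h; rw [pvMatchA_eq] at h; rw [pvRank_eq]
  split_ifs with h0 h1 h2 h3 h4 <;> first | omega | exact absurd h h3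

set_option maxHeartbeats 1000000 in
theorem pvM1_4 : ∀ a, pvRank a = 4 → pvMatchA "gemini-2.5-flash" a = true := by
  intro a h; rw [pvMatchA_eq]; rw [pvRank_eq] at h
  split_ifs at h with h0 h1 h2 h3 h4 <;> first | omega | exact h4

set_option maxHeartbeats 1000000 in
theorem pvM2_4 : ∀ a, pvMatchA "gemini-2.5-flash" a = true → pvRank a ≤ 4 := by
  intro a h; rw [pvMatchA_eq] at h; rw [pvRank_eq]
  split_ifs with h0 h1 h2 h3 h4 <;> first | omega | exact absurd h h4

def pvBuckets (available : List String) (k : Nat) : List String :=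
  (List.range k).flatMap (pvBucket available)

theorem pvMem_buckets {available : List String} {a : String} {k : Nat} :
    a ∈ pvBuckets available k ↔ a ∈ available ∧ pvRank a < k := by
  constructor
  · intro h
    rw [pvBuckets, List.mem_flatMap] at h
    obtain ⟨i, hi, hmem⟩ := h
    have h2 := pvBucket_rank hmem
    exact ⟨h2.2, by rw [h2.1]; exact List.mem_range.mp hi⟩
  · rintro ⟨ha, hr⟩
    rw [pvBuckets, List.mem_flatMap]
    exact ⟨pvRank a, List.mem_range.mpr hr, pvMem_bucket ha⟩

theorem pvStep_buckets (p : String) (k : Nat)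
    (hm1 : ∀ a, pvRank a = k → pvMatchA p a = true)
    (hm2 : ∀ a, pvMatchA p a = true → pvRank a ≤ k)
    (available : List String) :
    available.foldl (fun ch a =>
        if pvMatchA p a then (if a ∈ ch then ch else ch ++ [a]) else ch)
      (pvBuckets available k)
      = pvBuckets available (k + 1) := by
  rw [pvInner_fold' p k hm1 hm2 available _
      (fun a ha => (pvMem_buckets.mp ha).2)
      (fun a ha hr => pvMem_buckets.mpr ⟨ha, hr⟩)]
  simp [pvBuckets, List.range_succ, List.flatMap_append]

theorem pvPhase1_eq (available : List String) :
    PREFERRED_GEMINI_MODELS.foldl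
      (fun chosen p => available.foldl
        (fun chosen a =>
          if pvMatchA p a then (if a ∈ chosen then chosen else chosen ++ [a]) else chosen)
        chosen) []
    = (List.range 5).flatMap (pvBucket available) := by
  simp only [PREFERRED_GEMINI_MODELS, List.foldl_cons, List.foldl_nil]
  have e0 := pvStep_buckets "gemini-1.5-flash" 0 pvM1_0 pvM2_0 available
  rw [show pvBuckets available 0 = [] from rfl] at e0
  rw [e0, pvStep_buckets _ 1 pvM1_1 pvM2_1,
      pvStep_buckets _ 2 pvM1_2 pvM2_2, pvStep_buckets _ 3 pvM1_3 pvM2_3,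
      pvStep_buckets _ 4 pvM1_4 pvM2_4]
  rfl

theorem pvInsertBy_cons (bef : String → String → Bool) (x y : String) (ys : List String) :
    PySem.List.insertBy bef x (y :: ys)
      = if bef x y then x :: y :: ys else y :: PySem.List.insertBy bef x ys := by
  simp [PySem.List.insertBy]

theorem pvInsertBy_split (bef : String → String → Bool) (x : String) :
    ∀ (ys zs : List String), (∀ y ∈ ys, bef x y = false) → (∀ z ∈ zs, bef x z = true) →
    PySem.List.insertBy bef x (ys ++ zs) = ys ++ x :: zs := by
  intro ys
  induction ys with
  | nil =>
    intro zs _ hz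
    cases zs with
    | nil => rfl
    | cons z zs =>
      simp only [List.nil_append, pvInsertBy_cons, hz z List.mem_cons_self, if_true]
  | cons y ys ih =>
    intro zs hy hz
    simp only [List.cons_append, pvInsertBy_cons, hy y List.mem_cons_self,
      Bool.false_eq_true, if_false]
    rw [ih zs (fun b hb => hy b (List.mem_cons_of_mem y hb)) hz]

theorem pvSorted_buckets :
    ∀ (xs : List String), (∀ a ∈ xs, pvRank a < 5) →
    PySem.List.sorted xs (fun a => pvRank a) false
      = (List.range 5).flatMap (fun i => xs.filter (fun a => pvRank a == i)) := by
  intro xs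
  induction xs using List.reverseRecOn with
  | nil => intro _; simp [PySem.List.sorted]
  | append_singleton xs x ih =>
    intro hlt
    have hx : pvRank x < 5 := hlt x (by simp)
    have hxs : ∀ a ∈ xs, pvRank a < 5 := fun a ha => hlt a (by simp [ha])
    rw [PySem.List.sorted_eq_foldl_insertBy, List.foldl_append, List.foldl_cons, List.foldl_nil,
       ← PySem.List.sorted_eq_foldl_insertBy, ih hxs]
    -- split range 5 at pvRank x + 1
    have hsplit : List.range 5
        = List.range (pvRank x + 1) ++ (List.range (5 - (pvRank x + 1))).map (fun j => (pvRank x + 1) + j) := by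
      rw [← List.range_add]
      congr 1
      omega
    rw [hsplit, List.flatMap_append, List.flatMap_append]
    rw [pvInsertBy_split _ x _ _
        (by intro y hy
            rw [List.mem_flatMap] at hy
            obtain ⟨i, hi, hyf⟩ := hy
            have : pvRank y = i := by simpa using (List.mem_filter.mp hyf).2
            have : pvRank y ≤ pvRank x := by
              have := List.mem_range.mp hi; omega
            simpa using this
            )
        (by intro z hz
            rw [List.mem_flatMap] at hz
            obtain ⟨i, hi, hzf⟩ := hz
            have h1 : pvRank z = i := by simpa using (List.mem_filter.mp hzf).2
            have h2 : pvRank x < pvRank z := by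
              simp [List.mem_map] at hi
              obtain ⟨j, _, hj⟩ := hi
              omega
            simpa using h2)]
    have hfilters : ∀ (i : Nat), i ≠ pvRank x →
        (xs ++ [x]).filter (fun a => pvRank a == i) = xs.filter (fun a => pvRank a == i) := by
      intro i hi
      rw [List.filter_append]
      simp [List.filter_cons]
      omega
    have hright : (List.map (fun j => pvRank x + 1 + j) (List.range (5 - (pvRank x + 1)))).flatMap
          (fun i => (xs ++ [x]).filter (fun a => pvRank a == i))
        = (List.map (fun j => pvRank x + 1 + j) (List.range (5 - (pvRank x + 1)))).flatMap
          (fun i => xs.filter (fun a => pvRank a == i)) := by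
      apply List.flatMap_congr
      intro i hi
      simp only [List.mem_map] at hi
      obtain ⟨j, _, hj⟩ := hi
      exact hfilters i (by omega)
    have hleft : (List.range (pvRank x + 1)).flatMap
          (fun i => (xs ++ [x]).filter (fun a => pvRank a == i))
        = (List.range (pvRank x + 1)).flatMap
          (fun i => xs.filter (fun a => pvRank a == i)) ++ [x] := by
      rw [List.range_succ, List.flatMap_append, List.flatMap_append]
      have hmid : [pvRank x].flatMap (fun i => (xs ++ [x]).filter (fun a => pvRank a == i))
          = [pvRank x].flatMap (fun i => xs.filter (fun a => pvRank a == i)) ++ [x] := by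
        simp [List.filter_append]
      rw [hmid, List.flatMap_congr (l := List.range (pvRank x))
          (g := fun i => xs.filter (fun a => pvRank a == i))
          (by intro i hi; exact hfilters i (by have := List.mem_range.mp hi; omega))]
      simp
    rw [hright, hleft]
    simp

def pvDseen (seen : List String) : List String → List String
  | [] => []
  | a :: t => if a ∈ seen then pvDseen seen t else a :: pvDseen (seen ++ [a]) t

theorem pvOfList_eq_dseen : ∀ (t s : List String),
    t.foldl PySem.Set.add s = s ++ pvDseen s t := by
  intro t
  induction t with
  | nil => intro s; simp [pvDseen]
  | cons a t ih =>
    intro s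
    simp only [List.foldl_cons, pvDseen]
    by_cases ha : a ∈ s
    · rw [if_pos ha, PySem.Set.add_of_mem ha, ih s]
    · rw [if_neg ha, PySem.Set.add_of_not_mem ha, ih (s ++ [a])]
      simp

theorem pvDedup_eq_dseen (available : List String) :
    PySem.List.dedup available = pvDseen [] available := by
  show PySem.Set.ofList available = _
  have := pvOfList_eq_dseen available []
  simpa [PySem.Set.ofList, PySem.Set.empty] using this

theorem pvSim : ∀ (t seen S : List String),
    (S.length < 6 ∨ seen = []) →
    (∀ a ∈ t, pvRank a < 5 → a ∈ S) →
    (∀ a ∈ t, a ∈ seen → a ∈ S) →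
    (∀ a ∈ S, pvRank a < 5 ∨ a ∈ seen) →
    pvPhase2A S t = pvPhase2B 5 S (pvDseen seen t) := by
  intro t
  induction t with
  | nil => intro seen S _ _ _ _; rfl
  | cons a t ih =>
    intro seen S h0 h1 h2 h3
    simp only [pvPhase2A, pvDseen]
    by_cases hseen : a ∈ seen
    · -- duplicate: A skips (a ∈ S), no B step; |S| < 6 so no break
      have haS : a ∈ S := h2 a List.mem_cons_self hseen
      have hlt : S.length < 6 := by
        rcases h0 with h | h
        · exact h
        · rw [h] at hseen; exact absurd hseen (List.not_mem_nil)
      rw [if_pos hseen]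
      simp only [if_pos haS, if_neg (by omega : ¬ 6 ≤ S.length)]
      exact ih seen S (Or.inl hlt) (fun b hb => h1 b (List.mem_cons_of_mem a hb))
        (fun b hb => h2 b (List.mem_cons_of_mem a hb)) h3
    · rw [if_neg hseen]
      simp only [pvPhase2B]
      by_cases hr : pvRank a < 5
      · -- matched: both skip, same break check
        have haS : a ∈ S := h1 a List.mem_cons_self hr
        have hne : (pvRank a == 5) = false := by simp; omega
        rw [hne]
        simp only [if_pos haS, Bool.false_eq_true, if_false]
        by_cases hbr : 6 ≤ S.length
        · rw [if_pos hbr, if_pos hbr]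
        · rw [if_neg hbr, if_neg hbr]
          exact ih (seen ++ [a]) S (Or.inl (by omega))
            (fun b hb => h1 b (List.mem_cons_of_mem a hb))
            (by intro b hb hbs
                rcases List.mem_append.mp hbs with h | h
                · exact h2 b (List.mem_cons_of_mem a hb) h
                · simp at h; subst h; exact haS)
            (by intro b hb
                rcases h3 b hb with h | h
                · exact Or.inl h
                · exact Or.inr (List.mem_append.mpr (Or.inl h)))
      · -- unmatched: both append, same break check
        have hr5 : pvRank a = 5 := by have := pvRank_le a; omega
        have haS : a ∉ S := by
          intro hc
          rcases h3 a hc with h | h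
          · omega
          · exact hseen h
        have heq : (pvRank a == 5) = true := by simp [hr5]
        rw [heq]
        simp only [if_neg haS, if_true]
        by_cases hbr : 6 ≤ (S ++ [a]).length
        · rw [if_pos hbr, if_pos hbr]
        · rw [if_neg hbr, if_neg hbr]
          exact ih (seen ++ [a]) (S ++ [a])
            (Or.inl (by simp only [List.length_append, List.length_cons, List.length_nil] at hbr ⊢; omega))
            (by intro b hb hblt; exact List.mem_append.mpr (Or.inl (h1 b (List.mem_cons_of_mem a hb) hblt)))
            (by intro b hb hbs
                rcases List.mem_append.mp hbs with h | h
                · exact List.mem_append.mpr (Or.inl (h2 b (List.mem_cons_of_mem a hb) h))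
                · simp at h; subst h; exact List.mem_append.mpr (Or.inr (by simp))
                )
            (by intro b hb
                rcases List.mem_append.mp hb with h | h
                · rcases h3 b h with h' | h'
                  · exact Or.inl h'
                  · exact Or.inr (List.mem_append.mpr (Or.inl h'))
                · simp at h; subst h; exact Or.inr (List.mem_append.mpr (Or.inr (by simp))))

theorem pvAlt_eq (available : List String) :
    pick_candidate_models_alt available
      = pvPhase2B 5
          (PySem.List.sorted ((PySem.List.dedup available).filter (fun a => pvRank a < 5))
            (fun a => pvRank a) false)
          (PySem.List.dedup available) := by
  unfold pick_candidate_models_alt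
  rfl

theorem pvSorted_part (available : List String) :
    PySem.List.sorted ((PySem.List.dedup available).filter (fun a => pvRank a < 5))
        (fun a => pvRank a) false
      = (List.range 5).flatMap (pvBucket available) := by
  rw [pvSorted_buckets _ (by
    intro a ha
    have := (List.mem_filter.mp ha).2
    simpa using this)]
  apply List.flatMap_congr
  intro i hi
  have hi5 : i < 5 := List.mem_range.mp hi
  show ((PySem.List.dedup available).filter (fun a => decide (pvRank a < 5))).filter
      (fun a => pvRank a == i) = pvBucket available i
  rw [List.filter_filter]
  apply List.filter_congr
  intro a _
  by_cases h : pvRank a = i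
  · simp [h, hi5]
  · simp [h]

-- ===== VERDICT (by name: the statement is the Claim_ definition above) =====
theorem pick_candidate_models_spec : Claim_equal_pick_candidate_models := by
  intro available _
  unfold Spec_pick_candidate_models
  have hA : pick_candidate_models available
      = pvPhase2A ((List.range 5).flatMap (pvBucket available)) available := by
    unfold pick_candidate_models
    rw [pvPhase1_eq]
  rw [hA, pvAlt_eq, pvSorted_part,
      show PySem.List.dedup available = pvDseen [] available from pvDedup_eq_dseen available]
  exact pvSim available [] ((List.range 5).flatMap (pvBucket available))
    (Or.inr rfl)
    (fun a ha hr => pvMem_buckets.mpr ⟨ha, hr⟩)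
    (fun a _ h => absurd h List.not_mem_nil)
    (fun a ha => Or.inl (pvMem_buckets.mp ha).2)
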